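-- pv_equiv track=rewrite | github.com/AnzheYuan1217/DCU | CA117/Lab_1.2/password_012.py | task
-- ===== SOURCE A (Python) =====
-- def task(s):
--     digit, lower, upper, other = 0, 0, 0, 0
--     for i in s:
--         if i.isdigit():
--             digit = 1
--
--         elif i.islower():
--             lower = 1
--
--         elif i.isupper():
--             upper = 1
--
--         else:
--             other = 1
--
--     return digit + lower + upper + other
-- ===== SOURCE B (Python) =====
-- def task(s):
--     digit = any(c.isdigit() for c in s)
--     lower = any(c.islower() for c in s)
--     upper = any(c.isupper() for c in s)
--     other = any(not (c.isdigit() or c.islower() or c.isupper()) for c in s)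
--     return digit + lower + upper + other
-- ===== Notes on version B (the rewrite author's own statement) =====
-- stated objective: idiomatic
-- what changed: Replaces the single pass with a mutable if/elif flag chain by four independent any() existence scans, one per character category, summed as booleans.
import Mathlib
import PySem

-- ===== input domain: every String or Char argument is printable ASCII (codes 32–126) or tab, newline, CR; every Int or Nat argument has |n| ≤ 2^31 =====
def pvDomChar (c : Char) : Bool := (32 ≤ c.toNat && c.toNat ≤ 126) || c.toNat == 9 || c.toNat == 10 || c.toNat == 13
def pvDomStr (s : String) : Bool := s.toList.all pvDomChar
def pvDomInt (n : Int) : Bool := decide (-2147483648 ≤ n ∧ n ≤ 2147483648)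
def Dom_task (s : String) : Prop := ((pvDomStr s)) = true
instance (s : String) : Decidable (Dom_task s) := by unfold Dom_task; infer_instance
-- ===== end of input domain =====

-- B replaces A's single flag-setting if/elif pass by four independent any() existence scans (idiomatic decomposition; same cost).

-- ===== PORT A =====
-- one step of A's loop: the if/elif chain setting one of the four flags
def taskStep (st : Int × Int × Int × Int) (c : Char) : Int × Int × Int × Int :=
  if PySem.Chars.isdigit c then (1, st.2.1, st.2.2.1, st.2.2.2)
  else if PySem.Chars.islower c then (st.1, 1, st.2.2.1, st.2.2.2)
  else if PySem.Chars.isupper c then (st.1, st.2.1, 1, st.2.2.2)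
  else (st.1, st.2.1, st.2.2.1, 1)

def task (s : String) : Int :=
  let st := s.toList.foldl taskStep (0, 0, 0, 0)
  st.1 + st.2.1 + st.2.2.1 + st.2.2.2

-- ===== PORT B =====
-- bool → int coercion used when Python sums booleans
def b2i (b : Bool) : Int := if b then 1 else 0

def task_alt (s : String) : Int :=
  b2i (s.toList.any PySem.Chars.isdigit)
  + b2i (s.toList.any PySem.Chars.islower)
  + b2i (s.toList.any PySem.Chars.isupper)
  + b2i (s.toList.any (fun c => !(PySem.Chars.isdigit c || PySem.Chars.islower c || PySem.Chars.isupper c)))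

-- ===== PRECONDITION & SPEC =====
def Spec_task (s : String) (out : Int) : Prop := out = task_alt s
instance (s : String) (out : Int) : Decidable (Spec_task s out) := by unfold Spec_task; infer_instance

-- ===== CLAIM (what is proved, stated in full; the proofs are below) =====
def Claim_equal_task : Prop := ∀ (s : String), Dom_task s → Spec_task s (task s)

-- ===== LEMMAS AND PROOFS =====
-- the character categories are disjoint, so A's elif guards reduce to the bare predicates
theorem not_digit_and_lower (c : Char) :
    (!PySem.Chars.isdigit c && PySem.Chars.islower c) = PySem.Chars.islower c := by
  cases hd : PySem.Chars.isdigit c <;> cases hl : PySem.Chars.islower c <;>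
    simp_all [PySem.Chars.isdigit, PySem.Chars.islower, Char.le_def, UInt32.le_iff_toNat_le] <;> omega

theorem not_digit_lower_and_upper (c : Char) :
    (!PySem.Chars.isdigit c && (!PySem.Chars.islower c && PySem.Chars.isupper c)) = PySem.Chars.isupper c := by
  cases hd : PySem.Chars.isdigit c <;> cases hl : PySem.Chars.islower c <;> cases hu : PySem.Chars.isupper c <;>
    simp_all [PySem.Chars.isdigit, PySem.Chars.islower, PySem.Chars.isupper, Char.le_def, UInt32.le_iff_toNat_le] <;> omega

-- each component of A's foldl state records whether its (disjoint) guard fired somewhere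
theorem foldl_taskStep (l : List Char) (st : Int × Int × Int × Int) :
    l.foldl taskStep st =
      ((if l.any PySem.Chars.isdigit then 1 else st.1),
       (if l.any (fun c => !PySem.Chars.isdigit c && PySem.Chars.islower c) then 1 else st.2.1),
       (if l.any (fun c => !PySem.Chars.isdigit c && (!PySem.Chars.islower c && PySem.Chars.isupper c)) then 1 else st.2.2.1),
       (if l.any (fun c => !PySem.Chars.isdigit c && (!PySem.Chars.islower c && !PySem.Chars.isupper c)) then 1 else st.2.2.2)) := by
  induction l generalizing st with
  | nil => simp
  | cons c t ih =>
    simp only [List.foldl_cons, List.any_cons, ih, taskStep]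
    by_cases hd : PySem.Chars.isdigit c <;> by_cases hl : PySem.Chars.islower c <;>
      by_cases hu : PySem.Chars.isupper c <;> simp [hd, hl, hu]

-- ===== VERDICT (by name: the statement is the Claim_ definition above) =====
theorem task_spec : Claim_equal_task := by
  intro s _
  unfold Spec_task task task_alt
  rw [foldl_taskStep]
  have hl : (fun c => !PySem.Chars.isdigit c && PySem.Chars.islower c) = PySem.Chars.islower :=
    funext not_digit_and_lower
  have hu : (fun c => !PySem.Chars.isdigit c && (!PySem.Chars.islower c && PySem.Chars.isupper c))
      = PySem.Chars.isupper := funext not_digit_lower_and_upper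
  have ho : (fun c => !PySem.Chars.isdigit c && (!PySem.Chars.islower c && !PySem.Chars.isupper c))
      = (fun c => !(PySem.Chars.isdigit c || PySem.Chars.islower c || PySem.Chars.isupper c)) := by
    funext c
    cases PySem.Chars.isdigit c <;> cases PySem.Chars.islower c <;> cases PySem.Chars.isupper c <;> rfl
  rw [hl, hu, ho]
  simp only [b2i]
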